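-- pv_equiv track=rewrite | github.com/Florian2Richter/quantum-code-distance | src/stabilizer/distance.py | _mul_poly
-- ===== SOURCE A (Python) =====
-- from typing import Dict, Tuple
--
-- def _mul_poly(a: Dict[int,int], b: Dict[int,int]) -> Dict[int,int]:
--     r = {}
--     for x in a:
--         for y in b:
--             e = x + y
--             r[e] = r.get(e,0) ^ 1
--             if not r[e]: r.pop(e)
--     return r
-- ===== SOURCE B (Python) =====
-- def _xor_add(p, q):
--     s = {e: 1 for e in p if e not in q}
--     s.update({e: 1 for e in q if e not in p})
--     return s
--
-- def _mul_poly(a, b):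
--     result = {}
--     for x in a:
--         result = _xor_add(result, {x + y: 1 for y in b})
--     return result
-- ===== Notes on version B (the rewrite author's own statement) =====
-- stated objective: alternative
-- what changed: A toggles single entries in and out of the result dict inside a nested loop over all key pairs (get/xor/pop); B decomposes the product algebraically as repeated GF(2) polynomial addition: for each exponent x of a it builds the shifted row {x+y: 1 for y in b} and folds it into the accumulator with a symmetric-difference helper built from two dict comprehensions. B is not faster: rebuilding the accumulator once per row costs more than A's in-place toggles.
import Mathlib
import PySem

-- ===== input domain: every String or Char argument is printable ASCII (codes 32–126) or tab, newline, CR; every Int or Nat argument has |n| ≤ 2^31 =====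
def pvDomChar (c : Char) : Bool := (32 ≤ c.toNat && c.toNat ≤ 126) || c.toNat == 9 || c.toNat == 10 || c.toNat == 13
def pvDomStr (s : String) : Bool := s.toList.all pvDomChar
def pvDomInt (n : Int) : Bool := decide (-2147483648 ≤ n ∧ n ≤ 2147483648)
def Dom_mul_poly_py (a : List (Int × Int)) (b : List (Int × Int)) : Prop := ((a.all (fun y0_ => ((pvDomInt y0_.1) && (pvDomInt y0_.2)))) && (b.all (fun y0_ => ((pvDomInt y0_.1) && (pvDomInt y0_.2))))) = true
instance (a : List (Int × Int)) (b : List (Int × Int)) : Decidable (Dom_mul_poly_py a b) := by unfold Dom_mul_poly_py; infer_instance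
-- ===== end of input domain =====

-- B replaces A's per-pair toggle-and-pop loop by the algebraic decomposition of the product:
-- for each exponent x of a it builds the shifted row of b and adds it to the accumulator with a
-- GF(2) symmetric-difference helper (two dict comprehensions); objective: alternative.

-- ===== PORT A =====
-- 'for x in a' on a Python dict iterates its keys, in order: (Dict.ofList a).keys.
-- 'r.pop(e)' on a present key: its effect on the dict is Dict.erase (the returned value is unused).
def mul_poly_py (a : List (Int × Int)) (b : List (Int × Int)) : List (Int × Int) :=
  (((PySem.Dict.ofList a).keys).foldl (fun r x =>
      ((PySem.Dict.ofList b).keys).foldl (fun r y =>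
        let e := x + y
        let v := PySem.Int.bxor (r.getD e 0) 1
        let r' := r.insert e v
        if v == 0 then r'.erase e else r') r)
    (PySem.Dict.empty : PySem.Dict Int Int)).items

-- ===== PORT B =====
-- _xor_add(p, q): '{e: 1 for e in p if e not in q}' is a comprehension over p's keys filtered by
-- membership in q; 's.update(…)' inserts the second comprehension's pairs in order (Dict.update).
def pvXorAdd (p q : PySem.Dict Int Int) : PySem.Dict Int Int :=
  (PySem.Dict.ofList ((p.keys.filter (fun e => !(q.contains e))).map (fun e => (e, (1 : Int))))).update
    ((q.keys.filter (fun e => !(p.contains e))).map (fun e => (e, (1 : Int))))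

-- the shifted row '{x + y: 1 for y in b}' is a comprehension over b's keys.
def mul_poly_py_alt (a : List (Int × Int)) (b : List (Int × Int)) : List (Int × Int) :=
  (((PySem.Dict.ofList a).keys).foldl (fun result x =>
      pvXorAdd result (PySem.Dict.ofList (((PySem.Dict.ofList b).keys).map (fun y => (x + y, (1 : Int))))))
    (PySem.Dict.empty : PySem.Dict Int Int)).items

-- ===== PRECONDITION & SPEC =====
def Spec_mul_poly_py (a : List (Int × Int)) (b : List (Int × Int)) (out : List (Int × Int)) : Prop := out = mul_poly_py_alt a b
instance (a : List (Int × Int)) (b : List (Int × Int)) (out : List (Int × Int)) : Decidable (Spec_mul_poly_py a b out) := by unfold Spec_mul_poly_py; infer_instance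

-- ===== CLAIM (what is proved, stated in full; the proofs are below) =====
def Claim_equal_mul_poly_py : Prop := ∀ (a : List (Int × Int)) (b : List (Int × Int)), Dom_mul_poly_py a b → Spec_mul_poly_py a b (mul_poly_py a b)

-- ===== LEMMAS AND PROOFS =====

/-- A's loop body, as a step function on one exponent. -/
def pvF (r : PySem.Dict Int Int) (e : Int) : PySem.Dict Int Int :=
  let v := PySem.Int.bxor (r.getD e 0) 1
  let r' := r.insert e v
  if v == 0 then r'.erase e else r'

/-- Symmetric difference of two key lists, keeping first-list order then second-list order. -/
def pvMerge (s t : List Int) : List Int :=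
  s.filter (fun e => !(t.contains e)) ++ t.filter (fun e => !(s.contains e))

theorem pvMerge_nodup {s t : List Int} (hs : s.Nodup) (ht : t.Nodup) : (pvMerge s t).Nodup := by
  unfold pvMerge
  refine List.Nodup.append (hs.filter _) (ht.filter _) ?_
  intro x hx₁ hx₂
  rcases List.mem_filter.mp hx₁ with ⟨hxs, _⟩
  rcases List.mem_filter.mp hx₂ with ⟨_, hns⟩
  simp at hns
  exact hns hxs

theorem pvMapFilter (l : List (Int × Int)) (e : Int) (v : Int) :
    ((l.map (fun p => if p.1 == e then (e, v) else p)).filter (fun p => !(p.1 == e)))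
      = l.filter (fun p => !(p.1 == e)) := by
  induction l with
  | nil => rfl
  | cons p l ih =>
    by_cases h : p.1 = e
    · rw [List.map_cons, if_pos (by simpa using h), List.filter_cons_of_neg (by simp),
        List.filter_cons_of_neg (by simp [h]), ih]
    · rw [List.map_cons, if_neg (by simpa using h), List.filter_cons_of_pos (by simp [h]),
        List.filter_cons_of_pos (by simp [h]), ih]

theorem pvMerge_cons_mem {s es : List Int} {e : Int} (he : e ∈ s) (hne : e ∉ es) :
    pvMerge (s.filter (fun x => !(x == e))) es = pvMerge s (e :: es) := by
  unfold pvMerge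
  congr 1
  · rw [List.filter_filter]
    apply List.filter_congr
    intro x hx
    by_cases hxe : x = e <;> simp [hxe]
  · rw [List.filter_cons_of_neg (by simpa using he)]
    apply List.filter_congr
    intro x hx
    have hxe : x ≠ e := fun h => hne (h ▸ hx)
    simp [hxe]

theorem pvMerge_append_not_mem {s es : List Int} {e : Int} (hs : e ∉ s) (hne : e ∉ es) :
    pvMerge (s ++ [e]) es = pvMerge s (e :: es) := by
  unfold pvMerge
  have h1 : (s ++ [e]).filter (fun x => !(es.contains x)) = s.filter (fun x => !(es.contains x)) ++ [e] := by
    have hce : es.contains e = false := by simpa using hne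
    rw [List.filter_append, List.filter_singleton]
    simp [hne]
  have h2 : es.filter (fun x => !((s ++ [e]).contains x)) = es.filter (fun x => !(s.contains x)) := by
    apply List.filter_congr
    intro x hx
    have hxe : x ≠ e := fun h => hne (h ▸ hx)
    simp [hxe]
  have h3 : s.filter (fun x => !((e :: es).contains x)) = s.filter (fun x => !(es.contains x)) := by
    apply List.filter_congr
    intro x hx
    have hxe : x ≠ e := fun h => hs (h ▸ hx)
    simp [hxe]
  have h4 : (e :: es).filter (fun x => !(s.contains x)) = e :: es.filter (fun x => !(s.contains x)) := by
    rw [List.filter_cons_of_pos (by simpa using hs)]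
  rw [h1, h2, h3, h4, List.append_assoc, List.singleton_append]

/-- Keys of a dict whose items are `s` paired with 1. -/
theorem pvKeys_of_items {d : PySem.Dict Int Int} {s : List Int}
    (h : d.items = s.map (fun e => (e, (1 : Int)))) : d.keys = s := by
  show d.items.map Prod.fst = s
  rw [h, List.map_map]
  exact List.map_id _

/-- A's inner loop over one row of exponents computes the symmetric difference. -/
theorem pvFoldA_row (es : List Int) : ∀ (d : PySem.Dict Int Int) (s : List Int),
    d.items = s.map (fun e => (e, (1 : Int))) → s.Nodup → es.Nodup →
    (es.foldl pvF d).items = (pvMerge s es).map (fun e => (e, (1 : Int))) := by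
  induction es with
  | nil =>
    intro d s hd hs _
    simp [pvMerge, hd]
  | cons e es ih =>
    intro d s hd hs hes
    have hkeys : d.keys = s := pvKeys_of_items hd
    have hknd : d.keys.Nodup := by rw [hkeys]; exact hs
    have hene : e ∉ es := (List.nodup_cons.mp hes).1
    have hesnd : es.Nodup := (List.nodup_cons.mp hes).2
    rw [List.foldl_cons]
    by_cases he : e ∈ s
    · have hmem : (e, (1 : Int)) ∈ d.items := by
        rw [hd]; exact List.mem_map_of_mem he
      have hgd : d.getD e 0 = 1 := PySem.Dict.getD_of_mem_items d hmem hknd 0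
      have hcont : d.contains e = true := by
        rw [PySem.Dict.contains_iff_mem_keys, hkeys]; exact he
      have hstep : (pvF d e).items = (s.filter (fun x => !(x == e))).map (fun e => (e, (1 : Int))) := by
        unfold pvF
        rw [hgd, show PySem.Int.bxor 1 1 = 0 from by decide, if_pos (by decide)]
        show ((d.insert e 0).items.filter (fun p => !(p.1 == e))) = _
        rw [PySem.Dict.items_insert_of_contains d 0 hcont, hd, pvMapFilter, List.filter_map]
        rfl
      have := ih (pvF d e) (s.filter (fun x => !(x == e))) hstep (hs.filter _) hesnd
      rw [this, pvMerge_cons_mem he hene]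
    · have hcont : d.contains e = false := by
        cases hc : d.contains e
        · rfl
        · exact absurd (hkeys ▸ (PySem.Dict.contains_iff_mem_keys d e).1 hc) he
      have hgd : d.getD e 0 = 0 := PySem.Dict.getD_of_not_contains d 0 hcont
      have hstep : (pvF d e).items = (s ++ [e]).map (fun e => (e, (1 : Int))) := by
        unfold pvF
        rw [hgd, show PySem.Int.bxor 0 1 = 1 from by decide, if_neg (by decide)]
        rw [PySem.Dict.items_insert_of_not_contains d 1 hcont, hd, List.map_append]
        rfl
      have hnd' : (s ++ [e]).Nodup := by
        rw [List.nodup_append]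
        refine ⟨hs, List.nodup_singleton e, ?_⟩
        intro a ha b hb
        rw [List.mem_singleton] at hb
        exact fun h => he ((h.trans hb) ▸ ha)
      have := ih (pvF d e) (s ++ [e]) hstep hnd' hesnd
      rw [this, pvMerge_append_not_mem he hene]

/-- `ofList` over pairs with distinct keys keeps exactly those pairs. -/
theorem pvOfList_items {s : List Int} (hs : s.Nodup) :
    (PySem.Dict.ofList (s.map (fun e => (e, (1 : Int))))).items = s.map (fun e => (e, (1 : Int))) := by
  show ((s.map (fun e => (e, (1 : Int)))).foldl (fun acc p => acc.insert p.1 p.2)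
      (PySem.Dict.empty : PySem.Dict Int Int)).items = _
  rw [PySem.Dict.items_foldl_insert_fresh _ Prod.fst Prod.snd _
      (fun p _ => PySem.Dict.contains_empty p.1)
      (by simpa [List.map_map, Function.comp_def] using hs)]
  simp [PySem.Dict.empty]

/-- B's helper computes the symmetric difference. -/
theorem pvXorAdd_items {r : PySem.Dict Int Int} {s es : List Int}
    (hr : r.items = s.map (fun e => (e, (1 : Int)))) (hs : s.Nodup) (hes : es.Nodup) :
    (pvXorAdd r (PySem.Dict.ofList (es.map (fun e => (e, (1 : Int)))))).items
      = (pvMerge s es).map (fun e => (e, (1 : Int))) := by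
  set q := PySem.Dict.ofList (es.map (fun e => (e, (1 : Int)))) with hq
  have hqitems : q.items = es.map (fun e => (e, (1 : Int))) := pvOfList_items hes
  have hqkeys : q.keys = es := pvKeys_of_items hqitems
  have hrkeys : r.keys = s := pvKeys_of_items hr
  have hqcont : ∀ x, q.contains x = es.contains x := by
    intro x
    rw [PySem.Dict.contains_eq_decide_mem_keys, hqkeys]
    simp
  have hrcont : ∀ x, r.contains x = s.contains x := by
    intro x
    rw [PySem.Dict.contains_eq_decide_mem_keys, hrkeys]
    simp
  unfold pvXorAdd
  rw [hrkeys, hqkeys]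
  have h1 : s.filter (fun e => !(q.contains e)) = s.filter (fun e => !(es.contains e)) :=
    List.filter_congr (fun x _ => by rw [hqcont])
  have h2 : es.filter (fun e => !(r.contains e)) = es.filter (fun e => !(s.contains e)) :=
    List.filter_congr (fun x _ => by rw [hrcont])
  rw [h1, h2]
  set s₁ := s.filter (fun e => !(es.contains e)) with hs₁
  set t₁ := es.filter (fun e => !(s.contains e)) with ht₁
  have hs₁nd : s₁.Nodup := hs.filter _
  have ht₁nd : t₁.Nodup := hes.filter _
  have hbase : (PySem.Dict.ofList (s₁.map (fun e => (e, (1 : Int))))).items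
      = s₁.map (fun e => (e, (1 : Int))) := pvOfList_items hs₁nd
  show ((t₁.map (fun e => (e, (1 : Int)))).foldl (fun acc p => acc.insert p.1 p.2)
      (PySem.Dict.ofList (s₁.map (fun e => (e, (1 : Int)))))).items = _
  rw [PySem.Dict.items_foldl_insert_fresh _ Prod.fst Prod.snd _
      (fun p hp => ?_) (by simpa [List.map_map, Function.comp_def] using ht₁nd), hbase]
  · unfold pvMerge
    rw [← hs₁, ← ht₁]
    simp [List.map_map, Function.comp_def]
  · -- every key of the second comprehension is fresh for the first dict
    have hkeys₁ : (PySem.Dict.ofList (s₁.map (fun e => (e, (1 : Int))))).keys = s₁ :=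
      pvKeys_of_items hbase
    rcases List.mem_map.mp hp with ⟨x, hx, hpx⟩
    have hxt : x ∈ t₁ := hx
    have hxns : x ∉ s := by
      rcases List.mem_filter.mp hxt with ⟨_, hns⟩
      simpa using hns
    cases hc : (PySem.Dict.ofList (s₁.map (fun e => (e, (1 : Int))))).contains p.1
    · rfl
    · exfalso
      have := (PySem.Dict.contains_iff_mem_keys _ p.1).1 hc
      rw [hkeys₁, ← hpx] at this
      exact hxns (List.mem_filter.mp this).1

/-- A's outer fold tracks the symmetric-difference states. -/
theorem pvFoldA (b : List (Int × Int)) (xs : List Int) :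
    ∀ (d : PySem.Dict Int Int) (s : List Int),
    d.items = s.map (fun e => (e, (1 : Int))) → s.Nodup →
    (xs.foldl (fun r x =>
        ((PySem.Dict.ofList b).keys).foldl (fun r y =>
          let e := x + y
          let v := PySem.Int.bxor (r.getD e 0) 1
          let r' := r.insert e v
          if v == 0 then r'.erase e else r') r) d).items
      = (xs.foldl (fun s x => pvMerge s (((PySem.Dict.ofList b).keys).map (fun y => x + y))) s).map
          (fun e => (e, (1 : Int))) := by
  induction xs with
  | nil => intro d s hd _; simpa using hd
  | cons x xs ih =>
    intro d s hd hs
    rw [List.foldl_cons, List.foldl_cons]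
    have hrow : (((PySem.Dict.ofList b).keys).map (fun y => x + y)).Nodup := by
      refine (PySem.Dict.nodup_keys_ofList b).map ?_
      intro u v h
      have h' : x + u = x + v := h
      omega
    have hinner : (((PySem.Dict.ofList b).keys).foldl (fun r y =>
          let e := x + y
          let v := PySem.Int.bxor (r.getD e 0) 1
          let r' := r.insert e v
          if v == 0 then r'.erase e else r') d)
        = ((((PySem.Dict.ofList b).keys).map (fun y => x + y)).foldl pvF d) := by
      rw [List.foldl_map]
      rfl
    have hstep := pvFoldA_row (((PySem.Dict.ofList b).keys).map (fun y => x + y)) d s hd hs hrow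
    rw [hinner] at *
    exact ih _ _ hstep (pvMerge_nodup hs hrow)

/-- B's outer fold tracks the same states. -/
theorem pvFoldB (b : List (Int × Int)) (xs : List Int) :
    ∀ (d : PySem.Dict Int Int) (s : List Int),
    d.items = s.map (fun e => (e, (1 : Int))) → s.Nodup →
    (xs.foldl (fun result x =>
        pvXorAdd result (PySem.Dict.ofList (((PySem.Dict.ofList b).keys).map (fun y => (x + y, (1 : Int)))))) d).items
      = (xs.foldl (fun s x => pvMerge s (((PySem.Dict.ofList b).keys).map (fun y => x + y))) s).map
          (fun e => (e, (1 : Int))) := by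
  induction xs with
  | nil => intro d s hd _; simpa using hd
  | cons x xs ih =>
    intro d s hd hs
    rw [List.foldl_cons, List.foldl_cons]
    have hrow : (((PySem.Dict.ofList b).keys).map (fun y => x + y)).Nodup := by
      refine (PySem.Dict.nodup_keys_ofList b).map ?_
      intro u v h
      have h' : x + u = x + v := h
      omega
    have hpairs : (PySem.Dict.ofList (((PySem.Dict.ofList b).keys).map (fun y => (x + y, (1 : Int)))))
        = PySem.Dict.ofList (((((PySem.Dict.ofList b).keys).map (fun y => x + y)).map (fun e => (e, (1 : Int))))) := by
      rw [List.map_map]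
      rfl
    have hstep := pvXorAdd_items (r := d) hd hs hrow
    rw [hpairs]
    exact ih _ _ hstep (pvMerge_nodup hs hrow)

-- ===== VERDICT (by name: the statement is the Claim_ definition above) =====
theorem mul_poly_py_spec : Claim_equal_mul_poly_py := by
  intro a b _
  unfold Spec_mul_poly_py mul_poly_py mul_poly_py_alt
  rw [pvFoldA b ((PySem.Dict.ofList a).keys) PySem.Dict.empty [] rfl List.nodup_nil,
    pvFoldB b ((PySem.Dict.ofList a).keys) PySem.Dict.empty [] rfl List.nodup_nil]
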